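-- pv_equiv track=rewrite | github.com/kelvinhuang0327/number-pattern-research | tools/power_2bet_hedging.py | diversify_bets
-- ===== SOURCE A (Python) =====
-- from collections import Counter
--
-- def get_zone(num):
--     """獲取號碼所在區間 (1-4)"""
--     if 1 <= num <= 10:
--         return 1
--     elif 11 <= num <= 20:
--         return 2
--     elif 21 <= num <= 30:
--         return 3
--     else:
--         return 4
--
-- def diversify_bets(bet1, bet2, history, max_overlap=3):
--     """
--     多樣化處理：確保兩注重疊不超過 max_overlap 個
--
--     當重疊過多時，用適度冷號替換注2，確保區間分散
--     """
--     overlap = set(bet1) & set(bet2)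
--
--     if len(overlap) <= max_overlap:
--         return bet1, bet2
--
--     recent = history[-50:] if len(history) >= 50 else history
--
--     # 計算冷度 (距離上次出現的期數)
--     last_seen = {i: len(recent) for i in range(1, 39)}
--     for idx, h in enumerate(recent):
--         for num in h['numbers']:
--             gap = len(recent) - 1 - idx
--             if gap < last_seen[num]:
--                 last_seen[num] = gap
--
--     # 保留部分非重疊的 Markov 結果
--     new_bet2 = [n for n in bet2 if n not in overlap][:max_overlap]
--
--     # 用適度冷號補充，確保區間分散
--     cold = sorted(last_seen.items(), key=lambda x: -x[1])
--     zones_used = Counter(get_zone(n) for n in new_bet2)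
--
--     for n, gap in cold:
--         if n not in bet1 and n not in new_bet2 and len(new_bet2) < 6:
--             z = get_zone(n)
--             if zones_used[z] < 2:  # 每區最多2個
--                 new_bet2.append(n)
--                 zones_used[z] += 1
--
--     # 補足至6個
--     for n, gap in cold:
--         if n not in bet1 and n not in new_bet2 and len(new_bet2) < 6:
--             new_bet2.append(n)
--
--     return bet1, sorted(new_bet2[:6])
-- ===== SOURCE B (Python) =====
-- def _zone(n):
--     return (n - 1) // 10 + 1 if 1 <= n <= 30 else 4
--
--
-- def diversify_bets(bet1, bet2, history, max_overlap=3):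
--     overlap = set(bet1) & set(bet2)
--     if len(overlap) <= max_overlap:
--         return bet1, bet2
--
--     recent = history[-50:]
--     m = len(recent)
--
--     # last occurrence index per number, by forward overwrite (no min comparisons)
--     last = {}
--     for idx, h in enumerate(recent):
--         for num in h['numbers']:
--             last[num] = idx
--
--     def gap(n):
--         return m - 1 - last[n] if n in last else m
--
--     kept = [n for n in bet2 if n not in overlap][:max_overlap]
--     zones = {}
--     for n in kept:
--         zones[_zone(n)] = zones.get(_zone(n), 0) + 1
--
--     avail = [n for n in range(1, 39) if n not in bet1 and n not in kept]
--     picked = list(kept)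
--
--     # no sort: repeatedly extract the coldest available number (ties -> smallest)
--     # phase 1: only numbers whose zone still has room
--     while len(picked) < 6:
--         best = None
--         for n in avail:
--             if zones.get(_zone(n), 0) < 2 and (best is None or gap(n) > gap(best)):
--                 best = n
--         if best is None:
--             break
--         avail.remove(best)
--         picked.append(best)
--         zones[_zone(best)] = zones.get(_zone(best), 0) + 1
--
--     # phase 2: zone cap ignored
--     while len(picked) < 6:
--         best = None
--         for n in avail:
--             if best is None or gap(n) > gap(best):
--                 best = n
--         if best is None:
--             break
--         avail.remove(best)
--         picked.append(best)
--
--     return bet1, sorted(picked[:6])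
-- ===== Notes on version B (the rewrite author's own statement) =====
-- stated objective: alternative
-- what changed: B never sorts: it records each number's last occurrence index by forward overwrite instead of A's min-gap updates, and replaces A's sort-then-two-scan greedy with repeated extraction of the coldest remaining number (a linear argmax over a shrinking availability list), first under the zone cap and then without it.
import Mathlib
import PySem

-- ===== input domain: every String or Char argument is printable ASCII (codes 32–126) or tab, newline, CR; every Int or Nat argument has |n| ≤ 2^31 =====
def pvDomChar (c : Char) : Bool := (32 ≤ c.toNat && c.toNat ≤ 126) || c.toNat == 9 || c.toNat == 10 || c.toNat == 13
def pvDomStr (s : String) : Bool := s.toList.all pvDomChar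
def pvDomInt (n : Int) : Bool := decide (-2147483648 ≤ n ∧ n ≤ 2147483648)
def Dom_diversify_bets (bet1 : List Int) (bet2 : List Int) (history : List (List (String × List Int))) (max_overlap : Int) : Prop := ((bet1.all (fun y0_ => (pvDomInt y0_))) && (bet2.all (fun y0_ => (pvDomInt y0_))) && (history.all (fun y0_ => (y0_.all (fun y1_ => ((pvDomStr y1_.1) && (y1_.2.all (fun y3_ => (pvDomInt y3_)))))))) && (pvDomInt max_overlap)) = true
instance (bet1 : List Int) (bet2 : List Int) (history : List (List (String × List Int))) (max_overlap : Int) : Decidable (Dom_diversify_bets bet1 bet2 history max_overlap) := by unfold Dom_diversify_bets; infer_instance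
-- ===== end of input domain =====

-- B replaces A's sort-then-scan greedy by repeated extraction of the coldest available number
-- (a linear argmax, no sort at all) and A's min-gap table by a forward overwrite of each
-- number's last occurrence index (objective: alternative, same cost; equality proved under Pre_).

-- ===== PORT A =====
def get_zone (num : Int) : Int :=
  if 1 ≤ num ∧ num ≤ 10 then 1
  else if 11 ≤ num ∧ num ≤ 20 then 2
  else if 21 ≤ num ∧ num ≤ 30 then 3
  else 4

-- `if gap < last_seen[num]: last_seen[num] = gap`; Python raises KeyError when num is no key
-- (the `none` case) — those inputs are excluded by Pre_.
def aUpd (gap : Int) (d : PySem.Dict Int Int) (num : Int) : PySem.Dict Int Int :=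
  match d.get? num with
  | none => d
  | some v => if gap < v then d.insert num gap else d

-- one record of the history loop; Python raises KeyError when 'numbers' is missing (the `none`
-- case) — those inputs are excluded by Pre_.
def aRecord (m : Int) (d : PySem.Dict Int Int) (p : Int × List (String × List Int)) : PySem.Dict Int Int :=
  match (PySem.Dict.mk p.2).get? "numbers" with
  | none => d
  | some nums => nums.foldl (aUpd (m - 1 - p.1)) d

def aStep1 (bet1 : List Int) (s : List Int × PySem.Dict Int Int) (n : Int) : List Int × PySem.Dict Int Int :=
  if n ∉ bet1 ∧ n ∉ s.1 ∧ s.1.length < 6 then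
    (if s.2.getD (get_zone n) 0 < 2 then (s.1 ++ [n], s.2.insert (get_zone n) (s.2.getD (get_zone n) 0 + 1)) else s)
  else s

def aStep2 (bet1 : List Int) (l : List Int) (n : Int) : List Int :=
  if n ∉ bet1 ∧ n ∉ l ∧ l.length < 6 then l ++ [n] else l

def diversify_bets (bet1 : List Int) (bet2 : List Int) (history : List (List (String × List Int))) (max_overlap : Int) : List Int × List Int :=
  let overlap : PySem.Set Int := PySem.Set.inter (PySem.Set.ofList bet1) (PySem.Set.ofList bet2)
  if (PySem.Set.len overlap : Int) ≤ max_overlap then (bet1, bet2)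
  else
    let recent := if 50 ≤ (history.length : Int) then PySem.List.slice history (some (-50)) none else history
    let m : Int := (recent.length : Int)
    let last_seen := (PySem.List.enumerate recent).foldl (aRecord m)
      ((PySem.List.pyRange 1 39 1).foldl (fun d i => d.insert i m) (PySem.Dict.empty : PySem.Dict Int Int))
    let new_bet2 := PySem.List.slice (bet2.filter (fun n => !(PySem.Set.contains overlap n))) none (some max_overlap)
    let cold := PySem.List.sorted last_seen.items (fun x => -x.2) false
    let zones_used := PySem.Dict.counter (new_bet2.map get_zone)
    let s1 := cold.foldl (fun s p => aStep1 bet1 s p.1) (new_bet2, zones_used)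
    let nb2 := cold.foldl (fun l p => aStep2 bet1 l p.1) s1.1
    (bet1, PySem.List.sorted (PySem.List.slice nb2 none (some 6)) (fun x => x) false)

-- ===== PORT B =====
def zone_alt (n : Int) : Int :=
  if 1 ≤ n ∧ n ≤ 30 then PySem.Int.floordiv (n - 1) 10 + 1 else 4

-- last[num] = idx (forward overwrite); Python raises KeyError when 'numbers' is missing
-- (the `none` case) — those inputs are excluded by Pre_.
def bRec (d : PySem.Dict Int Int) (p : Int × List (String × List Int)) : PySem.Dict Int Int :=
  match (PySem.Dict.mk p.2).get? "numbers" with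
  | none => d
  | some nums => nums.foldl (fun d' num => d'.insert num p.1) d

def bGap (m : Int) (last : PySem.Dict Int Int) (n : Int) : Int :=
  match last.get? n with
  | some i => m - 1 - i
  | none => m

-- the inner `for n in avail:` scan keeping the first strict gap improvement
def bBest (gap : Int → Int) (pred : Int → Bool) (avail : List Int) : Option Int :=
  avail.foldl (fun best n =>
    if pred n && (match best with | none => true | some b => decide (gap n > gap b))
    then some n else best) none

-- `while len(picked) < 6:` — each iteration appends one number, so fuel 6 always suffices;
-- the fuel and the unreachable `remove?` none-branch only make the recursion total.
def bPhase1 (gap : Int → Int) : Nat → List Int → PySem.Dict Int Int → List Int → List Int × PySem.Dict Int Int × List Int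
  | 0, picked, zones, avail => (picked, zones, avail)
  | fuel + 1, picked, zones, avail =>
    if picked.length < 6 then
      match bBest gap (fun n => decide (zones.getD (zone_alt n) 0 < 2)) avail with
      | none => (picked, zones, avail)
      | some b =>
        match PySem.List.remove? avail b with
        | none => (picked, zones, avail)
        | some avail' =>
          bPhase1 gap fuel (picked ++ [b]) (zones.insert (zone_alt b) (zones.getD (zone_alt b) 0 + 1)) avail'
    else (picked, zones, avail)

def bPhase2 (gap : Int → Int) : Nat → List Int → List Int → List Int × List Int
  | 0, picked, avail => (picked, avail)
  | fuel + 1, picked, avail =>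
    if picked.length < 6 then
      match bBest gap (fun _ => true) avail with
      | none => (picked, avail)
      | some b =>
        match PySem.List.remove? avail b with
        | none => (picked, avail)
        | some avail' => bPhase2 gap fuel (picked ++ [b]) avail'
    else (picked, avail)

def diversify_bets_alt (bet1 : List Int) (bet2 : List Int) (history : List (List (String × List Int))) (max_overlap : Int) : List Int × List Int :=
  let overlap : PySem.Set Int := PySem.Set.inter (PySem.Set.ofList bet1) (PySem.Set.ofList bet2)
  if (PySem.Set.len overlap : Int) ≤ max_overlap then (bet1, bet2)
  else
    let recent := PySem.List.slice history (some (-50)) none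
    let m : Int := (recent.length : Int)
    let last := (PySem.List.enumerate recent).foldl bRec (PySem.Dict.empty : PySem.Dict Int Int)
    let gap := bGap m last
    let kept := PySem.List.slice (bet2.filter (fun n => !(PySem.Set.contains overlap n))) none (some max_overlap)
    let zones := kept.foldl (fun d n => d.insert (zone_alt n) (d.getD (zone_alt n) 0 + 1)) (PySem.Dict.empty : PySem.Dict Int Int)
    let avail := (PySem.List.pyRange 1 39 1).filter (fun n => !bet1.contains n && !kept.contains n)
    let s1 := bPhase1 gap 6 kept zones avail
    let s2 := bPhase2 gap 6 s1.1 s1.2.2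
    (bet1, PySem.List.sorted (PySem.List.slice s2.1 none (some 6)) (fun x => x) false)

-- ===== PRECONDITION & SPEC =====
-- Pre_ excludes exactly the inputs where the Python A raises KeyError: those reaching the long
-- branch whose last 50 history records lack a 'numbers' entry or mention a number outside 1..38.
def Pre_diversify_bets (bet1 : List Int) (bet2 : List Int) (history : List (List (String × List Int))) (max_overlap : Int) : Prop :=
  ((PySem.Set.len (PySem.Set.inter (PySem.Set.ofList bet1) (PySem.Set.ofList bet2)) : Int) ≤ max_overlap) ∨
  (∀ h ∈ PySem.List.slice history (some (-50)) none,
      ((PySem.Dict.mk h).get? "numbers").isSome = true ∧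
      ∀ n ∈ ((PySem.Dict.mk h).get? "numbers").getD [], 1 ≤ n ∧ n ≤ 38)
instance (bet1 : List Int) (bet2 : List Int) (history : List (List (String × List Int))) (max_overlap : Int) : Decidable (Pre_diversify_bets bet1 bet2 history max_overlap) := by unfold Pre_diversify_bets; infer_instance

def pvWitness_diversify_bets : List Int × List Int × (List (List (String × List Int))) × Int :=
  ([1, 2, 3, 4], [1, 2, 3, 4], [[("numbers", [5, 6])]], 3)

def Spec_diversify_bets (bet1 : List Int) (bet2 : List Int) (history : List (List (String × List Int))) (max_overlap : Int) (out : List Int × List Int) : Prop := out = diversify_bets_alt bet1 bet2 history max_overlap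
instance (bet1 : List Int) (bet2 : List Int) (history : List (List (String × List Int))) (max_overlap : Int) (out : List Int × List Int) : Decidable (Spec_diversify_bets bet1 bet2 history max_overlap out) := by unfold Spec_diversify_bets; infer_instance

-- ===== CLAIM (what is proved, stated in full; the proofs are below) =====
def Claim_equal_diversify_bets : Prop := ∀ (bet1 : List Int) (bet2 : List Int) (history : List (List (String × List Int))) (max_overlap : Int), Dom_diversify_bets bet1 bet2 history max_overlap → Pre_diversify_bets bet1 bet2 history max_overlap → Spec_diversify_bets bet1 bet2 history max_overlap (diversify_bets bet1 bet2 history max_overlap)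

-- ===== LEMMAS AND PROOFS =====

theorem zone_alt_eq (n : Int) : zone_alt n = get_zone n := by
  unfold zone_alt get_zone PySem.Int.floordiv
  rw [Int.fdiv_eq_ediv]
  split_ifs <;> omega

-- the numbers list of one history record ([] where Python would raise KeyError)
def numsOf (p : Int × List (String × List Int)) : List Int := ((PySem.Dict.mk p.2).get? "numbers").getD []

abbrev inR (k : Int) : Prop := 1 ≤ k ∧ k < 39

-- the gaps at which k is hit, in record order
def gapsOf (m : Int) (L : List (Int × List (String × List Int))) (k : Int) : List Int :=
  L.filterMap (fun p => if k ∈ numsOf p then some (m - 1 - p.1) else none)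

-- the common specification value of both coldness computations
def theVal (m : Int) (L : List (Int × List (String × List Int))) (k : Int) : Int :=
  (gapsOf m L k).foldl min m

theorem aRecord_eq (m : Int) (d : PySem.Dict Int Int) (p : Int × List (String × List Int)) :
    aRecord m d p = (numsOf p).foldl (aUpd (m - 1 - p.1)) d := by
  unfold aRecord numsOf
  cases (PySem.Dict.mk p.2).get? "numbers" <;> rfl

theorem bRec_eq (d : PySem.Dict Int Int) (p : Int × List (String × List Int)) :
    bRec d p = (numsOf p).foldl (fun d' num => d'.insert num p.1) d := by
  unfold bRec numsOf
  cases (PySem.Dict.mk p.2).get? "numbers" <;> rfl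

theorem aInner_get? (gap : Int) (nums : List Int) (d : PySem.Dict Int Int) (g : Int → Int)
    (hd : ∀ k, d.get? k = if inR k then some (g k) else none) (k : Int) :
    (nums.foldl (aUpd gap) d).get? k =
      if inR k then some (if k ∈ nums then min (g k) gap else g k) else none := by
  induction nums generalizing d g with
  | nil => simp [hd k]
  | cons num t ih =>
    rw [List.foldl_cons]
    by_cases hn : inR num
    · have hnum := hd num
      rw [if_pos hn] at hnum
      have hstep : ∀ k', (aUpd gap d num).get? k' =
          if inR k' then some (if k' = num then min (g k') gap else g k') else none := by
        intro k'
        unfold aUpd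
        rw [hnum]
        dsimp only
        by_cases he : k' = num
        · subst he
          by_cases hlt : gap < g k'
          · rw [if_pos hlt, PySem.Dict.get?_insert, if_pos rfl, if_pos hn, if_pos rfl]
            congr 1
            omega
          · rw [if_neg hlt, hd k', if_pos hn, if_pos rfl]
            rw [if_pos hn]
            congr 1
            omega
        · by_cases hlt : gap < g num
          · rw [if_pos hlt, PySem.Dict.get?_insert, if_neg he, hd k']
            split_ifs <;> simp
          · rw [if_neg hlt, hd k']
            split_ifs <;> simp
      rw [ih _ _ hstep]
      by_cases hk : inR k
      · simp only [if_pos hk, Option.some.injEq]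
        by_cases he : k = num
        · subst he
          by_cases hm : k ∈ t
          · simp only [hm, if_true, List.mem_cons, true_or]
            omega
          · simp [hm]
        · simp [he, List.mem_cons]
      · simp [hk]
    · have hnum := hd num
      rw [if_neg hn] at hnum
      have hskip : aUpd gap d num = d := by unfold aUpd; rw [hnum]
      rw [hskip, ih _ _ hd]
      by_cases hk : inR k
      · have hne : k ≠ num := fun he => hn (he ▸ hk)
        simp [List.mem_cons, hne]
      · simp [hk]

theorem aFold_get? (m : Int) (L : List (Int × List (String × List Int))) (d : PySem.Dict Int Int)
    (g : Int → Int) (hd : ∀ k, d.get? k = if inR k then some (g k) else none) (k : Int) :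
    (L.foldl (aRecord m) d).get? k =
      if inR k then some ((gapsOf m L k).foldl min (g k)) else none := by
  induction L generalizing d g with
  | nil => simp [gapsOf, hd k]
  | cons p L ih =>
    rw [List.foldl_cons, aRecord_eq]
    have hstep : ∀ k', ((numsOf p).foldl (aUpd (m - 1 - p.1)) d).get? k' =
        if inR k' then some (if k' ∈ numsOf p then min (g k') (m - 1 - p.1) else g k') else none :=
      fun k' => aInner_get? (m - 1 - p.1) (numsOf p) d g hd k'
    rw [ih _ _ hstep]
    unfold gapsOf
    by_cases hm : k ∈ numsOf p <;> simp [hm]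

theorem findSome?_eq_head?_filterMap {α β : Type} (f : α → Option β) (l : List α) :
    l.findSome? f = (l.filterMap f).head? := by
  induction l with
  | nil => rfl
  | cons a t ih =>
    cases h : f a with
    | none => simp only [List.findSome?_cons, List.filterMap_cons, h]; exact ih
    | some b => simp only [List.findSome?_cons, List.filterMap_cons, h, List.head?_cons]

theorem foldl_min_eq_getLast (g : List Int) (v0 : Int) (hpw : g.Pairwise (· > ·))
    (hlt : ∀ x ∈ g, x < v0) : g.foldl min v0 = (g.getLast?).getD v0 := by
  induction g generalizing v0 with
  | nil => rfl
  | cons a t ih =>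
    rw [List.foldl_cons]
    have ha : min v0 a = a := by
      have := hlt a (by simp); omega
    rw [ha, ih a ((List.pairwise_cons.mp hpw).2)
      (fun x hx => (List.pairwise_cons.mp hpw).1 x hx)]
    cases t with
    | nil => simp
    | cons x xs =>
      rw [List.getLast?_cons_cons]
      cases e : (x :: xs).getLast? with
      | none => simp at e
      | some y => rfl

theorem gapsOf_pairwise (m : Int) (R : List (List (String × List Int))) (k : Int) :
    (gapsOf m (PySem.List.enumerate R) k).Pairwise (· > ·) := by
  unfold gapsOf
  rw [List.pairwise_filterMap]
  refine (PySem.List.pairwise_lt_enumerate R 0).imp ?_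
  intro p q hpq b hb b' hb'
  split_ifs at hb hb'
  cases hb
  cases hb'
  omega

theorem gapsOf_bounds (m : Int) (R : List (List (String × List Int))) (hm : m = (R.length : Int))
    (k : Int) : ∀ x ∈ gapsOf m (PySem.List.enumerate R) k, 0 ≤ x ∧ x < m := by
  intro x hx
  unfold gapsOf at hx
  rw [List.mem_filterMap] at hx
  obtain ⟨p, hp, he⟩ := hx
  rw [PySem.List.mem_enumerate_iff] at hp
  obtain ⟨j, hj, rfl⟩ := hp
  split_ifs at he
  cases he
  simp only [zero_add]
  omega

theorem theVal_bounds (m : Int) (R : List (List (String × List Int))) (hm : m = (R.length : Int))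
    (k : Int) : 0 ≤ theVal m (PySem.List.enumerate R) k ∧ theVal m (PySem.List.enumerate R) k ≤ m := by
  unfold theVal
  have hb := gapsOf_bounds m R hm k
  have hle := (PySem.List.foldl_min_le (gapsOf m (PySem.List.enumerate R) k) m).1
  have hmem := PySem.List.foldl_min_mem (gapsOf m (PySem.List.enumerate R) k) m
  constructor
  · rcases hmem with h | h
    · rw [h]; omega
    · exact (hb _ h).1
  · exact hle

theorem foldl_keys_pres {β : Type} (f : PySem.Dict Int Int → β → PySem.Dict Int Int)
    (h : ∀ d x, (f d x).keys = d.keys) (l : List β) (d : PySem.Dict Int Int) :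
    (l.foldl f d).keys = d.keys := by
  induction l generalizing d with
  | nil => rfl
  | cons a t ih => rw [List.foldl_cons, ih, h]

theorem keys_aUpd (gap : Int) (d : PySem.Dict Int Int) (num : Int) :
    (aUpd gap d num).keys = d.keys := by
  unfold aUpd
  cases h : d.get? num with
  | none => rfl
  | some v =>
    dsimp only
    split_ifs with hlt
    · refine PySem.Dict.keys_insert_of_contains d _ ?_
      rw [PySem.Dict.contains_eq_isSome_get?, h]
      rfl
    · rfl

theorem keys_aRecord (m : Int) (d : PySem.Dict Int Int) (p : Int × List (String × List Int)) :
    (aRecord m d p).keys = d.keys := by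
  rw [aRecord_eq]
  exact foldl_keys_pres _ (fun d' x => keys_aUpd _ d' x) _ d

theorem init_items (m : Int) :
    ((PySem.List.pyRange 1 39 1).foldl (fun d i => d.insert i m) (PySem.Dict.empty : PySem.Dict Int Int)).items
      = (PySem.List.pyRange 1 39 1).map (fun i => (i, m)) := by
  rw [PySem.Dict.items_foldl_insert_fresh (k := fun a => a) (v := fun _ => m)]
  · rfl
  · intro a _
    exact PySem.Dict.contains_empty a
  · simpa using PySem.List.nodup_pyRange_one (a := 1) (b := 39)

theorem init_get? (m k : Int) :
    ((PySem.List.pyRange 1 39 1).foldl (fun d i => d.insert i m) (PySem.Dict.empty : PySem.Dict Int Int)).get? k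
      = if inR k then some m else none := by
  have hkeys : ((PySem.List.pyRange 1 39 1).foldl (fun d i => d.insert i m) (PySem.Dict.empty : PySem.Dict Int Int)).keys
      = PySem.List.pyRange 1 39 1 := by
    simp only [PySem.Dict.keys, init_items m, List.map_map]
    rfl
  by_cases hk : inR k
  · rw [if_pos hk]
    refine PySem.Dict.get?_of_mem_items _ ?_ ?_
    · rw [init_items m, List.mem_map]
      exact ⟨k, PySem.List.mem_pyRange_one.mpr ⟨hk.1, hk.2⟩, rfl⟩
    · rw [hkeys]
      exact PySem.List.nodup_pyRange_one 1 39
  · rw [if_neg hk]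
    rw [PySem.Dict.get?_eq_none_iff_not_mem_keys _ k, hkeys, PySem.List.mem_pyRange_one]
    exact fun h => hk ⟨h.1, h.2⟩

theorem aLast_get? (m : Int) (R : List (List (String × List Int))) (k : Int) :
    ((PySem.List.enumerate R).foldl (aRecord m)
        ((PySem.List.pyRange 1 39 1).foldl (fun d i => d.insert i m) (PySem.Dict.empty : PySem.Dict Int Int))).get? k
      = if inR k then some (theVal m (PySem.List.enumerate R) k) else none := by
  rw [aFold_get? m _ _ (fun _ => m) (init_get? m) k]
  rfl

-- A's coldness dict has items (k, theVal k) for k = 1..38 in order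
theorem aItems (m : Int) (R : List (List (String × List Int))) :
    ((PySem.List.enumerate R).foldl (aRecord m)
      ((PySem.List.pyRange 1 39 1).foldl (fun d i => d.insert i m) (PySem.Dict.empty : PySem.Dict Int Int))).items
    = (PySem.List.pyRange 1 39 1).map (fun k => (k, theVal m (PySem.List.enumerate R) k)) := by
  have hkeys : ((PySem.List.enumerate R).foldl (aRecord m)
      ((PySem.List.pyRange 1 39 1).foldl (fun d i => d.insert i m) (PySem.Dict.empty : PySem.Dict Int Int))).keys
      = PySem.List.pyRange 1 39 1 := by
    rw [foldl_keys_pres _ (fun d' x => keys_aRecord m d' x)]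
    simp only [PySem.Dict.keys, init_items m, List.map_map]
    rfl
  have hnd : ((PySem.List.enumerate R).foldl (aRecord m)
      ((PySem.List.pyRange 1 39 1).foldl (fun d i => d.insert i m) (PySem.Dict.empty : PySem.Dict Int Int))).keys.Nodup := by
    rw [hkeys]
    exact PySem.List.nodup_pyRange_one 1 39
  rw [PySem.Dict.items_eq_map_keys _ hnd 0, hkeys]
  refine List.map_congr_left ?_
  intro x hx
  have hin : inR x := by
    have := PySem.List.mem_pyRange_one.mp hx
    exact ⟨this.1, this.2⟩
  have hg := aLast_get? m R x
  rw [if_pos hin] at hg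
  rw [PySem.Dict.getD_of_get?_eq_some _ 0 hg]

-- B's last-occurrence dict: forward overwrite = last match of the reversed enumeration
theorem bInner_get? (i : Int) (nums : List Int) (d : PySem.Dict Int Int) (k : Int) :
    (nums.foldl (fun d' num => d'.insert num i) d).get? k =
      if k ∈ nums then some i else d.get? k := by
  induction nums generalizing d with
  | nil => simp
  | cons num t ih =>
    rw [List.foldl_cons, ih, PySem.Dict.get?_insert]
    by_cases he : k = num
    · subst he
      by_cases hm : k ∈ t <;> simp [hm]
    · simp [List.mem_cons, he]

theorem bFold_get? (L : List (Int × List (String × List Int))) (d : PySem.Dict Int Int) (k : Int) :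
    (L.foldl bRec d).get? k =
      match L.reverse.findSome? (fun p => if k ∈ numsOf p then some p.1 else none) with
      | some i => some i
      | none => d.get? k := by
  induction L generalizing d with
  | nil => simp
  | cons p L ih =>
    rw [List.foldl_cons, ih, List.reverse_cons, List.findSome?_append]
    cases h : L.reverse.findSome? (fun p => if k ∈ numsOf p then some p.1 else none) with
    | some i => rfl
    | none =>
      rw [bRec_eq, bInner_get?]
      by_cases hm : k ∈ numsOf p <;> simp [hm]

theorem findSome?_map_val {α : Type} (g : Int → Int) (f : α → Option Int) (l : List α) :
    l.findSome? (fun a => (f a).map g) = (l.findSome? f).map g := by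
  induction l with
  | nil => rfl
  | cons a t ih =>
    cases h : f a with
    | none => simp [List.findSome?_cons, h, ih]
    | some b => simp [List.findSome?_cons, h]

theorem bGap_eq (m : Int) (R : List (List (String × List Int))) (hm : m = (R.length : Int))
    (k : Int) :
    bGap m ((PySem.List.enumerate R).foldl bRec (PySem.Dict.empty : PySem.Dict Int Int)) k
      = theVal m (PySem.List.enumerate R) k := by
  unfold bGap
  rw [bFold_get?]
  have hmap : (PySem.List.enumerate R).reverse.findSome?
        (fun p => if k ∈ numsOf p then some (m - 1 - p.1) else none)
      = ((PySem.List.enumerate R).reverse.findSome? (fun p => if k ∈ numsOf p then some p.1 else none)).map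
          (fun i => m - 1 - i) := by
    rw [← findSome?_map_val (fun i => m - 1 - i) (fun p => if k ∈ numsOf p then some p.1 else none)]
    congr 1
    funext p
    by_cases hmem : k ∈ numsOf p <;> simp [hmem]
  have hval : theVal m (PySem.List.enumerate R) k
      = ((PySem.List.enumerate R).reverse.findSome?
          (fun p => if k ∈ numsOf p then some (m - 1 - p.1) else none)).getD m := by
    unfold theVal
    rw [foldl_min_eq_getLast _ _ (gapsOf_pairwise m R k) (fun x hx => (gapsOf_bounds m R hm k x hx).2)]
    rw [findSome?_eq_head?_filterMap, List.filterMap_reverse, List.head?_reverse]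
    rfl
  rw [hval, hmap]
  cases (PySem.List.enumerate R).reverse.findSome? (fun p => if k ∈ numsOf p then some p.1 else none) <;> simp

-- ===== cold order: A's sorted pairs as descending buckets (for lex-pairwise and nodup) =====

theorem insertBy_append_of_forall {α : Type} (before : α → α → Bool) (x : α) (l r : List α)
    (h : ∀ y ∈ l, before x y = false) :
    PySem.List.insertBy before x (l ++ r) = l ++ PySem.List.insertBy before x r := by
  induction l with
  | nil => rfl
  | cons y t ih =>
    have hy : before x y = false := h y (by simp)
    have ht : ∀ z ∈ t, before x z = false := fun z hz => h z (by simp [hz])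
    rw [List.cons_append,
      show PySem.List.insertBy before x (y :: (t ++ r)) =
        if before x y then x :: y :: (t ++ r) else y :: PySem.List.insertBy before x (t ++ r) from rfl,
      hy]
    simp only [Bool.false_eq_true, if_false, List.cons_append]
    rw [ih ht]

theorem insertBy_flatMap {α : Type} (key : α → Int) (gs : List Int) (F : Int → List α) (x : α)
    (hgs : gs.Pairwise (· < ·)) (hmem : key x ∈ gs) (hF : ∀ g, ∀ y ∈ F g, key y = g) :
    PySem.List.insertBy (fun a b => decide (key a < key b)) x (gs.flatMap F) =
      gs.flatMap (fun g => F g ++ if key x = g then [x] else []) := by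
  induction gs with
  | nil => cases hmem
  | cons g gs ih =>
    simp only [List.flatMap_cons]
    have hgle : g ≤ key x := by
      rcases List.mem_cons.mp hmem with h | h
      · omega
      · have := (List.pairwise_cons.mp hgs).1 (key x) h
        omega
    have hFg : ∀ y ∈ F g, (fun a b => decide (key a < key b)) x y = false := by
      intro y hy
      have hkey := hF g y hy
      simp only [decide_eq_false_iff_not]
      omega
    rw [insertBy_append_of_forall _ _ _ _ hFg]
    by_cases hx : key x = g
    · rw [if_pos hx]
      have hrest : gs.flatMap (fun g' => F g' ++ if key x = g' then [x] else []) = gs.flatMap F := by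
        refine List.flatMap_congr ?_
        intro g' hg'
        have := (List.pairwise_cons.mp hgs).1 g' hg'
        rw [if_neg (by omega), List.append_nil]
      have hins : PySem.List.insertBy (fun a b => decide (key a < key b)) x (gs.flatMap F) =
          x :: gs.flatMap F := by
        cases hgl : gs.flatMap F with
        | nil => rfl
        | cons y ys =>
          have hy : y ∈ gs.flatMap F := by rw [hgl]; simp
          rw [List.mem_flatMap] at hy
          obtain ⟨g', hg', hyF⟩ := hy
          have hk1 : key y = g' := hF g' y hyF
          have hk2 : g < g' := (List.pairwise_cons.mp hgs).1 g' hg'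
          rw [show PySem.List.insertBy (fun a b => decide (key a < key b)) x (y :: ys) =
              if decide (key x < key y) then x :: y :: ys else
                y :: PySem.List.insertBy (fun a b => decide (key a < key b)) x ys from rfl]
          rw [decide_eq_true (by omega : key x < key y)]
          simp
      rw [hins, hrest]
      simp
    · rw [if_neg hx]
      have hmem' : key x ∈ gs := by
        rcases List.mem_cons.mp hmem with h | h
        · exact absurd h hx
        · exact h
      rw [ih (List.pairwise_cons.mp hgs).2 hmem']
      simp

theorem sorted_eq_buckets {α : Type} (xs : List α) (key : α → Int) (gs : List Int)
    (hgs : gs.Pairwise (· < ·)) (hx : ∀ x ∈ xs, key x ∈ gs) :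
    PySem.List.sorted xs key false = gs.flatMap (fun g => xs.filter (fun x => key x == g)) := by
  induction xs using List.reverseRecOn with
  | nil => simp [PySem.List.sorted]
  | append_singleton xs x ih =>
    rw [PySem.List.sorted_eq_foldl_insertBy, List.foldl_append, List.foldl_cons, List.foldl_nil,
        ← PySem.List.sorted_eq_foldl_insertBy]
    rw [ih (fun y hy => hx y (by simp [hy]))]
    rw [insertBy_flatMap key gs _ x hgs (hx x (by simp))
      (fun g y hy => by
        have := (List.mem_filter.mp hy).2
        exact beq_iff_eq.mp this)]
    refine List.flatMap_congr ?_
    intro g hg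
    rw [List.filter_append]
    congr 1
    by_cases hxg : key x = g
    · simp [hxg]
    · simp [hxg]

theorem hx_sorted (m : Int) (R : List (List (String × List Int))) (hm : m = (R.length : Int)) :
    ∀ x ∈ (PySem.List.pyRange 1 39 1).map (fun k => (k, theVal m (PySem.List.enumerate R) k)),
      (fun x => -x.2) x ∈ (PySem.List.pyRange m (-1) (-1)).map (fun g => -g) := by
  intro x hxm
  rw [List.mem_map] at hxm ⊢
  obtain ⟨k, hk, rfl⟩ := hxm
  refine ⟨theVal m (PySem.List.enumerate R) k, ?_, rfl⟩
  rw [PySem.List.mem_pyRange_neg_one]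
  have := theVal_bounds m R hm k
  omega

theorem gs_pairwise (m : Int) :
    ((PySem.List.pyRange m (-1) (-1)).map (fun g => -g)).Pairwise (· < ·) := by
  rw [PySem.List.pyRange_neg_one_eq_reverse, List.map_reverse, List.pairwise_reverse,
    List.pairwise_map]
  exact (PySem.List.pairwise_lt_pyRange_one _ _).imp (by intro a b h; omega)

theorem cold_map_fst (m : Int) (R : List (List (String × List Int))) (hm : m = (R.length : Int)) :
    (PySem.List.sorted ((PySem.List.pyRange 1 39 1).map (fun k => (k, theVal m (PySem.List.enumerate R) k))) (fun x => -x.2) false).map (fun p => p.1)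
      = (PySem.List.pyRange m (-1) (-1)).flatMap (fun g =>
          (PySem.List.pyRange 1 39 1).filter (fun k => theVal m (PySem.List.enumerate R) k == g)) := by
  rw [sorted_eq_buckets _ _ ((PySem.List.pyRange m (-1) (-1)).map (fun g => -g))
    (gs_pairwise m) (hx_sorted m R hm)]
  rw [List.map_flatMap, List.flatMap_map]
  refine List.flatMap_congr ?_
  intro g hg
  rw [List.filter_map, List.map_map]
  have hpred : ((fun x => -x.2 == -g) ∘ (fun k => (k, theVal m (PySem.List.enumerate R) k)))
      = fun k => theVal m (PySem.List.enumerate R) k == g := by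
    funext k
    simp [Bool.beq_eq_decide_eq]
  rw [hpred]
  have hid : ((fun p : ℤ × ℤ => p.1) ∘ fun k => (k, theVal m (PySem.List.enumerate R) k)) = fun k => k := rfl
  rw [hid, List.map_id']

-- the lex "colder or same coldness and smaller" order in which A's cold list is arranged
def lexG (G : Int → Int) (a b : Int) : Prop := G b < G a ∨ (G a = G b ∧ a < b)

theorem gsdesc_pairwise (m : Int) : (PySem.List.pyRange m (-1) (-1)).Pairwise (· > ·) := by
  rw [PySem.List.pyRange_neg_one_eq_reverse, List.pairwise_reverse]
  exact (PySem.List.pairwise_lt_pyRange_one _ _).imp (by intro a b h; exact h)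

theorem buckets_pairwise_lex (G : Int → Int) (gs : List Int) (hgs : gs.Pairwise (· > ·)) :
    (gs.flatMap (fun g => (PySem.List.pyRange 1 39 1).filter (fun k => G k == g))).Pairwise (lexG G) := by
  induction gs with
  | nil => simp
  | cons g gs ih =>
    rw [List.flatMap_cons, List.pairwise_append]
    refine ⟨?_, ih (List.pairwise_cons.mp hgs).2, ?_⟩
    · have h1 : ((PySem.List.pyRange 1 39 1).filter (fun k => G k == g)).Pairwise (· < ·) :=
        List.Pairwise.sublist List.filter_sublist (PySem.List.pairwise_lt_pyRange_one 1 39)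
      refine List.Pairwise.imp_of_mem ?_ h1
      intro a b ha hb hab
      have hga : G a = g := by simpa using (List.mem_filter.mp ha).2
      have hgb : G b = g := by simpa using (List.mem_filter.mp hb).2
      exact Or.inr ⟨by rw [hga, hgb], hab⟩
    · intro a ha b hb
      have hga : G a = g := by simpa using (List.mem_filter.mp ha).2
      rw [List.mem_flatMap] at hb
      obtain ⟨g', hg', hbf⟩ := hb
      have hgb : G b = g' := by simpa using (List.mem_filter.mp hbf).2
      have : g > g' := (List.pairwise_cons.mp hgs).1 g' hg'
      exact Or.inl (by omega)

theorem CM_pairwise_lex (m : Int) (R : List (List (String × List Int))) (hm : m = (R.length : Int)) :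
    ((PySem.List.sorted ((PySem.List.pyRange 1 39 1).map (fun k => (k, theVal m (PySem.List.enumerate R) k))) (fun x => -x.2) false).map (fun p => p.1)).Pairwise (lexG (theVal m (PySem.List.enumerate R))) := by
  rw [cold_map_fst m R hm]
  exact buckets_pairwise_lex _ _ (gsdesc_pairwise m)

-- ===== the argmax scan: bBest finds the lex-least candidate =====

def bBestF (gap : Int → Int) (pred : Int → Bool) (best : Option Int) (n : Int) : Option Int :=
  if pred n && (match best with | none => true | some b => decide (gap n > gap b))
  then some n else best

theorem bBest_eq_foldl (gap : Int → Int) (pred : Int → Bool) (avail : List Int) :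
    bBest gap pred avail = avail.foldl (bBestF gap pred) none := rfl

theorem foldl_bBestF_id (gap : Int → Int) (pred : Int → Bool) :
    ∀ (l : List Int) (acc : Option Int), (∀ n ∈ l, pred n = false) →
    l.foldl (bBestF gap pred) acc = acc := by
  intro l
  induction l with
  | nil => intro acc _; rfl
  | cons x t ih =>
    intro acc h
    rw [List.foldl_cons, show bBestF gap pred acc x = acc from by
      unfold bBestF; rw [h x (by simp)]; rfl]
    exact ih acc (fun n hn => h n (by simp [hn]))

theorem bBest_none (gap : Int → Int) (pred : Int → Bool) (avail : List Int)
    (h : ∀ n ∈ avail, pred n = false) : bBest gap pred avail = none := by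
  rw [bBest_eq_foldl]
  exact foldl_bBestF_id gap pred avail none h

theorem bBestF_aux (gap : Int → Int) (pred : Int → Bool) (t : Int) :
    ∀ (l : List Int) (acc : Option Int), l.Pairwise (· < ·) →
    (∀ y ∈ l, pred y = true → lexG gap t y ∨ y = t) →
    ((acc = none ∧ t ∈ l ∧ pred t = true) ∨
     (∃ a, acc = some a ∧ pred a = true ∧ (∀ y ∈ l, a < y) ∧
       (t = a ∨ (t ∈ l ∧ pred t = true ∧ gap t > gap a)))) →
    l.foldl (bBestF gap pred) acc = some t := by
  intro l
  induction l with
  | nil =>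
    intro acc _ _ hacc
    rcases hacc with ⟨_, ht, _⟩ | ⟨a, ha, _, _, hta⟩
    · simp at ht
    · rcases hta with h | h
      · rw [ha, h]; simp
      · simp at h
  | cons x l ih =>
    intro acc hpw h2 hacc
    have hpwl : l.Pairwise (· < ·) := (List.pairwise_cons.mp hpw).2
    have hxl : ∀ y ∈ l, x < y := (List.pairwise_cons.mp hpw).1
    have h2l : ∀ y ∈ l, pred y = true → lexG gap t y ∨ y = t :=
      fun y hy => h2 y (by simp [hy])
    rw [List.foldl_cons]
    rcases hacc with ⟨hn, ht, hpt⟩ | ⟨a, ha, hpa, halt, hta⟩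
    · subst hn
      by_cases hxt : x = t
      · subst hxt
        have hstep : bBestF gap pred none x = some x := by
          unfold bBestF; simp [hpt]
        rw [hstep]
        refine ih (some x) hpwl h2l (Or.inr ⟨x, rfl, hpt, hxl, Or.inl rfl⟩)
      · have htl : t ∈ l := by
          rcases List.mem_cons.mp ht with h | h
          · exact absurd h.symm hxt
          · exact h
        cases hpx : pred x with
        | false =>
          have hstep : bBestF gap pred none x = none := by
            unfold bBestF; simp [hpx]
          rw [hstep]
          exact ih none hpwl h2l (Or.inl ⟨rfl, htl, hpt⟩)
        | true =>
          have hstep : bBestF gap pred none x = some x := by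
            unfold bBestF; simp [hpx]
          rw [hstep]
          have hxt' : x < t := hxl t htl
          have hgx : gap t > gap x := by
            rcases h2 x (by simp) hpx with hl | he
            · rcases hl with h | ⟨he, hlt⟩
              · exact h
              · omega
            · exact absurd he hxt
          exact ih (some x) hpwl h2l (Or.inr ⟨x, rfl, hpx, hxl, Or.inr ⟨htl, hpt, hgx⟩⟩)
    · subst ha
      rcases hta with hteq | ⟨htm, hpt, hgt⟩
      · subst hteq
        -- nothing ever beats t: any pred-true y in x :: l has gap y ≤ gap t
        have hnobeat : ∀ y ∈ x :: l, pred y = true → ¬ gap y > gap t := by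
          intro y hy hpy
          rcases h2 y hy hpy with hl | he
          · rcases hl with h | ⟨he', _⟩ <;> omega
          · subst he
            have := halt y hy
            omega
        have hstep : bBestF gap pred (some t) x = some t := by
          unfold bBestF
          cases hpx : pred x with
          | false => simp [hpx]
          | true =>
            have := hnobeat x (by simp) hpx
            simp [hpx, this]
        rw [hstep]
        exact ih (some t) hpwl h2l
          (Or.inr ⟨t, rfl, hpa, fun y hy => halt y (by simp [hy]), Or.inl rfl⟩)
      · by_cases hxt : x = t
        · subst hxt
          have hstep : bBestF gap pred (some a) x = some x := by
            unfold bBestF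
            simp [hpt, hgt]
          rw [hstep]
          exact ih (some x) hpwl h2l (Or.inr ⟨x, rfl, hpt, hxl, Or.inl rfl⟩)
        · have htl : t ∈ l := by
            rcases List.mem_cons.mp htm with h | h
            · exact absurd h.symm hxt
            · exact h
          have hxt' : x < t := hxl t htl
          by_cases hbeat : pred x = true ∧ gap x > gap a
          · have hstep : bBestF gap pred (some a) x = some x := by
              unfold bBestF
              simp [hbeat.1, hbeat.2]
            rw [hstep]
            have hgx : gap t > gap x := by
              rcases h2 x (by simp) hbeat.1 with hl | he
              · rcases hl with h | ⟨he, hlt⟩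
                · exact h
                · omega
              · exact absurd he hxt
            exact ih (some x) hpwl h2l (Or.inr ⟨x, rfl, hbeat.1, hxl, Or.inr ⟨htl, hpt, hgx⟩⟩)
          · have hstep : bBestF gap pred (some a) x = some a := by
              unfold bBestF
              cases hpx : pred x with
              | false => simp [hpx]
              | true =>
                have : ¬ gap x > gap a := fun hg => hbeat ⟨hpx, hg⟩
                simp [hpx, this]
            rw [hstep]
            exact ih (some a) hpwl h2l
              (Or.inr ⟨a, rfl, hpa, fun y hy => halt y (by simp [hy]), Or.inr ⟨htl, hpt, hgt⟩⟩)
  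
theorem bBest_some (gap : Int → Int) (pred : Int → Bool) (avail : List Int) (t : Int)
    (hpw : avail.Pairwise (· < ·)) (ht : t ∈ avail) (hpt : pred t = true)
    (h2 : ∀ y ∈ avail, pred y = true → lexG gap t y ∨ y = t) :
    bBest gap pred avail = some t := by
  rw [bBest_eq_foldl]
  exact bBestF_aux gap pred t avail none hpw h2 (Or.inl ⟨rfl, ht, hpt⟩)

-- ===== A's pass-1/2 folds, reduced to statically filtered lists =====

def step1' (s : List Int × PySem.Dict Int Int) (n : Int) : List Int × PySem.Dict Int Int :=
  if s.1.length < 6 then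
    (if s.2.getD (get_zone n) 0 < 2 then (s.1 ++ [n], s.2.insert (get_zone n) (s.2.getD (get_zone n) 0 + 1)) else s)
  else s

theorem aPass1_filter (bet1 kept : List Int) :
    ∀ (L : List Int) (s : List Int × PySem.Dict Int Int) (w : List Int),
    s.1 = kept ++ w → (∀ x ∈ L, x ∉ w) → L.Nodup →
    L.foldl (aStep1 bet1) s = (L.filter (fun n => !bet1.contains n && !kept.contains n)).foldl step1' s := by
  intro L
  induction L with
  | nil => intro s w _ _ _; rfl
  | cons n L ih =>
    intro s w hs hw hnd
    have hnw : n ∉ w := hw n (by simp)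
    have hwL : ∀ x ∈ L, x ∉ w := fun x hx => hw x (by simp [hx])
    have hndL : L.Nodup := (List.nodup_cons.mp hnd).2
    have hnL : n ∉ L := (List.nodup_cons.mp hnd).1
    rw [List.foldl_cons, List.filter_cons]
    by_cases hel : n ∉ bet1 ∧ n ∉ kept
    · have hbool : (!bet1.contains n && !kept.contains n) = true := by
        simp [hel.1, hel.2]
      rw [if_pos hbool, List.foldl_cons]
      have hns1 : n ∉ s.1 := by
        rw [hs]
        simp only [List.mem_append]
        rintro (h | h)
        · exact hel.2 h
        · exact hnw h
      have hstep : aStep1 bet1 s n = step1' s n := by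
        unfold aStep1 step1'
        by_cases hlen : s.1.length < 6
        · rw [if_pos ⟨hel.1, hns1, hlen⟩, if_pos hlen]
        · rw [if_neg (fun hc => hlen hc.2.2), if_neg hlen]
      rw [hstep]
      have hsplit : (step1' s n).1 = s.1 ∨ (step1' s n).1 = s.1 ++ [n] := by
        unfold step1'
        split_ifs <;> simp
      rcases hsplit with h | h
      · exact ih (step1' s n) w (h.trans hs) hwL hndL
      · refine ih (step1' s n) (w ++ [n]) (by rw [h, hs, List.append_assoc]) ?_ hndL
        intro x hx
        simp only [List.mem_append, List.mem_singleton]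
        rintro (h' | h')
        · exact hwL x hx h'
        · exact hnL (h' ▸ hx)
    · have hbool : (!bet1.contains n && !kept.contains n) = false := by
        rcases not_and_or.mp hel with h | h <;> simp at h <;> simp [h]
      rw [if_neg (by rw [hbool]; exact Bool.false_ne_true)]
      have hns1 : n ∈ bet1 ∨ n ∈ s.1 := by
        rcases not_and_or.mp hel with h | h
        · exact Or.inl (not_not.mp h)
        · exact Or.inr (by rw [hs]; exact List.mem_append.mpr (Or.inl (not_not.mp h)))
      have hstep : aStep1 bet1 s n = s := by
        unfold aStep1
        rw [if_neg]
        rintro ⟨h1, h2, _⟩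
        rcases hns1 with h | h
        · exact h1 h
        · exact h2 h
      rw [hstep]
      exact ih s w hs hwL hndL

theorem step1'_extend (T : List Int) (s : List Int × PySem.Dict Int Int) :
    ∃ u, (T.foldl step1' s).1 = s.1 ++ u := by
  induction T generalizing s with
  | nil => exact ⟨[], by simp⟩
  | cons n T ih =>
    rw [List.foldl_cons]
    obtain ⟨u, hu⟩ := ih (step1' s n)
    have hsplit : (step1' s n).1 = s.1 ∨ (step1' s n).1 = s.1 ++ [n] := by
      unfold step1'
      split_ifs <;> simp
    rcases hsplit with h | h
    · exact ⟨u, by rw [hu, h]⟩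
    · exact ⟨n :: u, by rw [hu, h, List.append_assoc]; rfl⟩

theorem aPass2_eq (bet1 : List Int) (l : List Int) (nb2 : List Int) (hnd : l.Nodup) :
    l.foldl (aStep2 bet1) nb2 =
      nb2 ++ (l.filter (fun n => n ∉ bet1 ∧ n ∉ nb2)).take (6 - nb2.length) := by
  induction l generalizing nb2 with
  | nil => simp
  | cons n t ih =>
    have hnd' : t.Nodup := (List.nodup_cons.mp hnd).2
    have hnt : n ∉ t := (List.nodup_cons.mp hnd).1
    rw [List.foldl_cons]
    by_cases h1 : n ∉ bet1 ∧ n ∉ nb2 ∧ nb2.length < 6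
    · rw [show aStep2 bet1 nb2 n = nb2 ++ [n] from by unfold aStep2; rw [if_pos h1]]
      rw [ih _ hnd']
      have hfe : t.filter (fun x => decide (x ∉ bet1 ∧ x ∉ nb2 ++ [n])) =
          t.filter (fun x => decide (x ∉ bet1 ∧ x ∉ nb2)) := by
        refine List.filter_congr ?_
        intro x hx
        have hne : x ≠ n := fun he => hnt (he ▸ hx)
        simp [hne]
      rw [hfe, List.filter_cons, if_pos (by simpa using ⟨h1.1, h1.2.1⟩)]
      have harith : 6 - nb2.length = (6 - (nb2 ++ [n]).length) + 1 := by
        simp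
        omega
      rw [harith, List.take_succ_cons]
      simp
    · rw [show aStep2 bet1 nb2 n = nb2 from by unfold aStep2; rw [if_neg h1]]
      rw [ih _ hnd']
      by_cases h2 : nb2.length < 6
      · have hdrop : ¬ (n ∉ bet1 ∧ n ∉ nb2) := fun hc => h1 ⟨hc.1, hc.2, h2⟩
        rw [List.filter_cons, if_neg (by simpa using hdrop)]
      · have h60 : 6 - nb2.length = 0 := by omega
        rw [h60]
        simp

theorem foldl_step1'_ge6 (T : List Int) (s : List Int × PySem.Dict Int Int) (h : ¬ s.1.length < 6) :
    T.foldl step1' s = s := by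
  induction T with
  | nil => rfl
  | cons t T ih => rw [List.foldl_cons, show step1' s t = s from by unfold step1'; rw [if_neg h], ih]

-- ===== phase 1 simulation: extraction = the filtered scan =====

theorem phase1_sim (gap : Int → Int) (bet1 : List Int) :
    ∀ (T D : List Int) (fuel : Nat) (picked : List Int) (zones : PySem.Dict Int Int) (avail : List Int),
    avail.Pairwise (· < ·) → avail.Nodup → (D ++ T).Nodup → (D ++ T).Pairwise (lexG gap) →
    (∀ x, x ∈ avail ↔ x ∈ D ++ T) → (∀ d ∈ D, ¬ zones.getD (get_zone d) 0 < 2) →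
    (∀ x ∈ avail, x ∉ picked) → 6 ≤ picked.length + fuel →
    (bPhase1 gap fuel picked zones avail).1 = (T.foldl step1' (picked, zones)).1 ∧
    (bPhase1 gap fuel picked zones avail).2.1 = (T.foldl step1' (picked, zones)).2 ∧
    (bPhase1 gap fuel picked zones avail).2.2.Pairwise (· < ·) ∧
    (bPhase1 gap fuel picked zones avail).2.2.Nodup ∧
    (∀ x, x ∈ (bPhase1 gap fuel picked zones avail).2.2 ↔
      x ∈ avail ∧ x ∉ (bPhase1 gap fuel picked zones avail).1) := by
  intro T
  induction T with
  | nil =>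
    intro D fuel picked zones avail hpwa hnda hndDT hlex hmem hD hdisj h6
    have hres : bPhase1 gap fuel picked zones avail = (picked, zones, avail) := by
      cases fuel with
      | zero => rfl
      | succ f =>
        by_cases hlen : picked.length < 6
        · have hall : ∀ n ∈ avail, (fun n => decide (zones.getD (zone_alt n) 0 < 2)) n = false := by
            intro n hn
            have hnD : n ∈ D := by simpa using (hmem n).mp hn
            simp only [zone_alt_eq, decide_eq_false_iff_not]
            exact hD n hnD
          simp only [bPhase1]
          rw [if_pos hlen, bBest_none _ _ avail hall]
        · simp only [bPhase1]
          rw [if_neg hlen]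
    rw [hres]
    exact ⟨rfl, rfl, hpwa, hnda, fun x => ⟨fun hx => ⟨hx, hdisj x hx⟩, fun h => h.1⟩⟩
  | cons t T' ihT =>
    intro D fuel picked zones avail hpwa hnda hndDT hlex hmem hD hdisj h6
    by_cases hlen : picked.length < 6
    · cases fuel with
      | zero => omega
      | succ fuel =>
        have h3 := List.nodup_append.mp hndDT
        have htT' : t ∉ T' := (List.nodup_cons.mp h3.2.1).1
        have htD : t ∉ D := fun ht => h3.2.2 t ht t (by simp) rfl
        by_cases hroom : zones.getD (get_zone t) 0 < 2
        · -- t is extracted, exactly A's next take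
          have htav : t ∈ avail := (hmem t).mpr (by simp)
          have hbest : bBest gap (fun n => decide (zones.getD (zone_alt n) 0 < 2)) avail = some t := by
            refine bBest_some gap _ avail t hpwa htav (by simp [zone_alt_eq, hroom]) ?_
            intro y hy hpy
            have hyDT := (hmem y).mp hy
            rcases List.mem_append.mp hyDT with hyD | hyT
            · exfalso
              refine hD y hyD ?_
              simpa [zone_alt_eq] using hpy
            · rcases List.mem_cons.mp hyT with he | hyT'
              · exact Or.inr he
              · refine Or.inl ?_
                have hp2 := (List.pairwise_append.mp hlex).2.1
                exact (List.pairwise_cons.mp hp2).1 y hyT'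
          have hrem : PySem.List.remove? avail t = some (avail.erase t) :=
            PySem.List.remove?_eq_some_erase avail t htav
          have hunf : bPhase1 gap (fuel + 1) picked zones avail
              = bPhase1 gap fuel (picked ++ [t])
                  (zones.insert (get_zone t) (zones.getD (get_zone t) 0 + 1)) (avail.erase t) := by
            simp only [bPhase1]
            rw [if_pos hlen, hbest]
            dsimp only
            rw [hrem]
            dsimp only
            simp only [zone_alt_eq]
          have hstepA : step1' (picked, zones) t
              = (picked ++ [t], zones.insert (get_zone t) (zones.getD (get_zone t) 0 + 1)) := by
            unfold step1'
            rw [if_pos hlen, if_pos hroom]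
          have hDT'nd : (D ++ T').Nodup :=
            ((List.sublist_cons_self t T').append_left D).nodup hndDT
          have hDT'lex : (D ++ T').Pairwise (lexG gap) :=
            List.Pairwise.sublist ((List.sublist_cons_self t T').append_left D) hlex
          have hmem' : ∀ x, x ∈ avail.erase t ↔ x ∈ D ++ T' := by
            intro x
            rw [hnda.mem_erase_iff, hmem x]
            simp only [List.mem_append, List.mem_cons]
            constructor
            · rintro ⟨hne, hD' | (he | hT')⟩
              · exact Or.inl hD'
              · exact absurd he hne
              · exact Or.inr hT'
            · rintro (hD' | hT')
              · exact ⟨fun he => htD (he ▸ hD'), Or.inl hD'⟩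
              · exact ⟨fun he => htT' (he ▸ hT'), Or.inr (Or.inr hT')⟩
          have hD' : ∀ d ∈ D, ¬ (zones.insert (get_zone t) (zones.getD (get_zone t) 0 + 1)).getD (get_zone d) 0 < 2 := by
            intro d hd
            rw [PySem.Dict.getD_insert]
            by_cases hz : get_zone d = get_zone t
            · exact absurd (hz ▸ hD d hd) (by simpa using hroom)
            · rw [if_neg hz]
              exact hD d hd
          obtain ⟨c1, c2, c3, c4, c5⟩ := ihT D fuel (picked ++ [t])
            (zones.insert (get_zone t) (zones.getD (get_zone t) 0 + 1)) (avail.erase t)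
            (List.Pairwise.sublist List.erase_sublist hpwa) (hnda.erase t)
            hDT'nd hDT'lex hmem' hD'
            (by
              intro x hx
              have hxa := (hnda.mem_erase_iff).mp hx
              simp only [List.mem_append, List.mem_singleton]
              rintro (hp | he)
              · exact hdisj x hxa.2 hp
              · exact hxa.1 he)
            (by simp only [List.length_append, List.length_singleton]; omega)
          have htout : t ∈ (bPhase1 gap fuel (picked ++ [t])
              (zones.insert (get_zone t) (zones.getD (get_zone t) 0 + 1)) (avail.erase t)).1 := by
            rw [c1]
            obtain ⟨u, hu⟩ := step1'_extend T'
              (picked ++ [t], zones.insert (get_zone t) (zones.getD (get_zone t) 0 + 1))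
            rw [hu]
            simp
          rw [hunf, List.foldl_cons, hstepA]
          refine ⟨c1, c2, c3, c4, fun x => ?_⟩
          rw [c5 x, hnda.mem_erase_iff]
          constructor
          · rintro ⟨⟨hne, hav⟩, hnp⟩
            exact ⟨hav, hnp⟩
          · rintro ⟨hav, hnp⟩
            exact ⟨⟨fun he => hnp (he ▸ htout), hav⟩, hnp⟩
        · -- t's zone is already full: A skips it, B will keep ignoring it (counts never shrink)
          have hstepA : step1' (picked, zones) t = (picked, zones) := by
            unfold step1'
            rw [if_pos hlen, if_neg hroom]
          have hndDT2 : (D ++ [t] ++ T').Nodup := by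
            rwa [List.append_assoc, List.singleton_append]
          have hlex2 : (D ++ [t] ++ T').Pairwise (lexG gap) := by
            rwa [List.append_assoc, List.singleton_append]
          have hmem2 : ∀ x, x ∈ avail ↔ x ∈ D ++ [t] ++ T' := by
            intro x
            rw [List.append_assoc, List.singleton_append]
            exact hmem x
          have hD2 : ∀ d ∈ D ++ [t], ¬ zones.getD (get_zone d) 0 < 2 := by
            intro d hd
            rcases List.mem_append.mp hd with h | h
            · exact hD d h
            · rw [List.mem_singleton] at h
              exact h ▸ hroom
          obtain ⟨c1, c2, c3, c4, c5⟩ := ihT (D ++ [t]) (fuel + 1) picked zones avail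
            hpwa hnda hndDT2 hlex2 hmem2 hD2 hdisj h6
          rw [List.foldl_cons, hstepA]
          exact ⟨c1, c2, c3, c4, c5⟩
    · have hres : bPhase1 gap fuel picked zones avail = (picked, zones, avail) := by
        cases fuel with
        | zero => rfl
        | succ f =>
          simp only [bPhase1]
          rw [if_neg hlen]
      rw [hres, foldl_step1'_ge6 _ _ hlen]
      exact ⟨rfl, rfl, hpwa, hnda, fun x => ⟨fun hx => ⟨hx, hdisj x hx⟩, fun h => h.1⟩⟩

theorem phase2_sim (gap : Int → Int) :
    ∀ (T : List Int) (fuel : Nat) (picked : List Int) (avail : List Int),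
    avail.Pairwise (· < ·) → T.Nodup → T.Pairwise (lexG gap) →
    (∀ x, x ∈ avail ↔ x ∈ T) → 6 ≤ picked.length + fuel →
    (bPhase2 gap fuel picked avail).1 = picked ++ T.take (6 - picked.length) := by
  intro T
  induction T with
  | nil =>
    intro fuel picked avail hpwa hndT hlex hmem h6
    have hav : avail = [] := List.eq_nil_iff_forall_not_mem.mpr (fun x hx => by simpa using (hmem x).mp hx)
    subst hav
    have hres : bPhase2 gap fuel picked [] = (picked, []) := by
      cases fuel with
      | zero => rfl
      | succ f =>
        by_cases hlen : picked.length < 6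
        · simp only [bPhase2]
          rw [if_pos hlen]
          rfl
        · simp only [bPhase2]
          rw [if_neg hlen]
    rw [hres]
    simp
  | cons t T' ihT =>
    intro fuel picked avail hpwa hndT hlex hmem h6
    by_cases hlen : picked.length < 6
    · cases fuel with
      | zero => omega
      | succ fuel =>
        have htT' : t ∉ T' := (List.nodup_cons.mp hndT).1
        have htav : t ∈ avail := (hmem t).mpr (by simp)
        have hnda : avail.Nodup := hpwa.nodup
        have hbest : bBest gap (fun _ => true) avail = some t := by
          refine bBest_some gap _ avail t hpwa htav rfl ?_
          intro y hy _
          rcases List.mem_cons.mp ((hmem y).mp hy) with he | hyT'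
          · exact Or.inr he
          · exact Or.inl ((List.pairwise_cons.mp hlex).1 y hyT')
        have hrem : PySem.List.remove? avail t = some (avail.erase t) :=
          PySem.List.remove?_eq_some_erase avail t htav
        have hunf : bPhase2 gap (fuel + 1) picked avail
            = bPhase2 gap fuel (picked ++ [t]) (avail.erase t) := by
          simp only [bPhase2]
          rw [if_pos hlen, hbest]
          dsimp only
          rw [hrem]
        have hmem' : ∀ x, x ∈ avail.erase t ↔ x ∈ T' := by
          intro x
          rw [hnda.mem_erase_iff, hmem x]
          simp only [List.mem_cons]
          constructor
          · rintro ⟨hne, he | hT⟩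
            · exact absurd he hne
            · exact hT
          · intro hT
            exact ⟨fun he => htT' (he ▸ hT), Or.inr hT⟩
        have hrec := ihT fuel (picked ++ [t]) (avail.erase t)
          (List.Pairwise.sublist List.erase_sublist hpwa)
          (List.nodup_cons.mp hndT).2 (List.pairwise_cons.mp hlex).2 hmem'
          (by simp only [List.length_append, List.length_singleton]; omega)
        rw [hunf, hrec]
        have harith : 6 - picked.length = (6 - (picked ++ [t]).length) + 1 := by
          simp only [List.length_append, List.length_singleton]
          omega
        rw [harith, List.take_succ_cons, List.append_assoc, List.singleton_append]
    · have hres : bPhase2 gap fuel picked avail = (picked, avail) := by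
        cases fuel with
        | zero => rfl
        | succ f =>
          simp only [bPhase2]
          rw [if_neg hlen]
      rw [hres]
      have h0 : 6 - picked.length = 0 := by omega
      rw [h0]
      simp

-- ===== VERDICT (by name: the statement is the Claim_ definition above) =====

theorem diversify_bets_spec : Claim_equal_diversify_bets := by
  intro bet1 bet2 history max_overlap _dom _pre
  unfold Spec_diversify_bets
  unfold diversify_bets diversify_bets_alt
  by_cases hov : (PySem.Set.len (PySem.Set.inter (PySem.Set.ofList bet1) (PySem.Set.ofList bet2)) : Int) ≤ max_overlap
  · simp only [if_pos hov]
  · simp only [if_neg hov]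
    have hrec : (if 50 ≤ (history.length : Int) then PySem.List.slice history (some (-50)) none else history)
        = PySem.List.slice history (some (-50)) none := by
      by_cases h : 50 ≤ (history.length : Int)
      · rw [if_pos h]
      · rw [if_neg h, PySem.List.slice_from_neg_ofNat history 50 (by norm_num)]
        have h0 : history.length - 50 = 0 := by omega
        rw [h0, List.drop_zero]
    rw [hrec]
    set R := PySem.List.slice history (some (-50)) none with hR
    set m : Int := (R.length : Int) with hm
    set G := theVal m (PySem.List.enumerate R) with hGdef
    have hgap : bGap m ((PySem.List.enumerate R).foldl bRec (PySem.Dict.empty : PySem.Dict Int Int)) = G :=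
      funext (fun k => bGap_eq m R hm k)
    rw [hgap, aItems m R]
    refine congrArg (fun z => (bet1, PySem.List.sorted (PySem.List.slice z none (some 6)) (fun x => x) false)) ?_
    set NB := PySem.List.slice (bet2.filter (fun n => !(PySem.Set.contains (PySem.Set.inter (PySem.Set.ofList bet1) (PySem.Set.ofList bet2)) n))) none (some max_overlap) with hNB
    have hzones : NB.foldl (fun d n => d.insert (zone_alt n) (d.getD (zone_alt n) 0 + 1)) (PySem.Dict.empty : PySem.Dict Int Int)
        = PySem.Dict.counter (NB.map get_zone) := by
      simp only [zone_alt_eq]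
      rw [← List.foldl_map (f := get_zone) (g := fun (d : PySem.Dict Int Int) (x : Int) => d.insert x (d.getD x 0 + 1)),
        PySem.Dict.foldl_insert_getD_add_one_eq_counter]
    rw [hzones]
    set Z := PySem.Dict.counter (NB.map get_zone) with hZ
    rw [← List.foldl_map (f := fun p : ℤ × ℤ => p.1) (g := aStep1 bet1)]
    rw [← List.foldl_map (f := fun p : ℤ × ℤ => p.1) (g := aStep2 bet1)]
    set CM := (PySem.List.sorted ((PySem.List.pyRange 1 39 1).map (fun k => (k, G k))) (fun x => -x.2) false).map (fun p => p.1) with hCM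
    have hpermCM : CM.Perm (PySem.List.pyRange 1 39 1) := by
      have h := (PySem.List.sorted_perm ((PySem.List.pyRange 1 39 1).map (fun k => (k, G k))) (fun x => -x.2) false).map (fun p : ℤ × ℤ => p.1)
      rw [hCM]
      refine h.trans ?_
      rw [List.map_map]
      have : ((fun p : ℤ × ℤ => p.1) ∘ fun k => (k, G k)) = fun k => k := rfl
      rw [this, List.map_id']
    have hCMnodup : CM.Nodup := hpermCM.nodup_iff.mpr (PySem.List.nodup_pyRange_one 1 39)
    have hCMlex : CM.Pairwise (lexG G) := by
      rw [hCM, hGdef]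
      exact CM_pairwise_lex m R hm
    have hmemCM : ∀ x, x ∈ CM ↔ (1 ≤ x ∧ x < 39) := by
      intro x
      rw [hpermCM.mem_iff, PySem.List.mem_pyRange_one]
    set elig := fun n : Int => !bet1.contains n && !NB.contains n with helig
    set S0 := CM.filter elig with hS0
    set avail0 := (PySem.List.pyRange 1 39 1).filter elig with havail0
    have hS0nodup : S0.Nodup := List.Nodup.sublist List.filter_sublist hCMnodup
    have hS0lex : S0.Pairwise (lexG G) := List.Pairwise.sublist List.filter_sublist hCMlex
    have hpw0 : avail0.Pairwise (· < ·) := List.Pairwise.sublist List.filter_sublist (PySem.List.pairwise_lt_pyRange_one 1 39)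
    have hnd0 : avail0.Nodup := List.Nodup.sublist List.filter_sublist (PySem.List.nodup_pyRange_one 1 39)
    have hmem0 : ∀ x, x ∈ avail0 ↔ x ∈ ([] : List Int) ++ S0 := by
      intro x
      rw [List.nil_append, hS0, havail0, List.mem_filter, List.mem_filter, hmemCM x, PySem.List.mem_pyRange_one]
    have hdisj0 : ∀ x ∈ avail0, x ∉ NB := by
      intro x hx
      have := (List.mem_filter.mp hx).2
      rw [helig] at this
      simp only [Bool.and_eq_true, Bool.not_eq_true'] at this
      simpa using this.2
    have hA1 : CM.foldl (aStep1 bet1) (NB, Z) = S0.foldl step1' (NB, Z) := by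
      refine aPass1_filter bet1 NB CM (NB, Z) [] (by simp) (by simp) hCMnodup
    obtain ⟨c1, c2, c3, c4, c5⟩ := phase1_sim G bet1 S0 [] 6 NB Z avail0 hpw0 hnd0
      (by simpa using hS0nodup) (by simpa using hS0lex) hmem0 (by simp) hdisj0 (by omega)
    set B1 := bPhase1 G 6 NB Z avail0 with hB1
    set av1 := B1.2.2 with hav1
    set nb2 := (S0.foldl step1' (NB, Z)).1 with hnb2
    have hc1 : B1.1 = nb2 := c1
    obtain ⟨u, hu⟩ := step1'_extend S0 (NB, Z)
    have hnbext : nb2 = NB ++ u := hu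
    set T2 := S0.filter (fun x => decide (x ∈ av1)) with hT2
    have hT2nodup : T2.Nodup := List.Nodup.sublist List.filter_sublist hS0nodup
    have hT2lex : T2.Pairwise (lexG G) := List.Pairwise.sublist List.filter_sublist hS0lex
    have hmemT2 : ∀ x, x ∈ av1 ↔ x ∈ T2 := by
      intro x
      rw [hT2, List.mem_filter]
      constructor
      · intro hx
        have h5 := (c5 x).mp hx
        refine ⟨?_, by simpa using hx⟩
        have := (hmem0 x).mp h5.1
        simpa using this
      · intro hx
        simpa using hx.2
    have hP2 : (bPhase2 G 6 B1.1 av1).1 = B1.1 ++ T2.take (6 - B1.1.length) :=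
      phase2_sim G T2 6 B1.1 av1 c3 hT2nodup hT2lex hmemT2 (by omega)
    have hfilter_eq : T2 = CM.filter (fun n => decide (n ∉ bet1 ∧ n ∉ nb2)) := by
      rw [hT2, hS0, List.filter_filter]
      refine List.filter_congr ?_
      intro n hn
      have hnr : 1 ≤ n ∧ n < 39 := (hmemCM n).mp hn
      by_cases hP : n ∉ bet1 ∧ n ∉ nb2
      · have hnNB : n ∉ NB := fun hmem => hP.2 (hnbext ▸ List.mem_append.mpr (Or.inl hmem))
        have helign : elig n = true := by
          rw [helig]
          simp [hP.1, hnNB]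
        have hnav : n ∈ av1 := by
          refine (c5 n).mpr ⟨?_, by rw [hc1]; exact hP.2⟩
          exact (hmem0 n).mpr (by simp [hS0, List.mem_filter, hn, helign])
        rw [helign]
        simp [hnav, hP]
      · have : ¬ (elig n = true ∧ n ∈ av1) := by
          rintro ⟨he, hav⟩
          have h5 := (c5 n).mp hav
          rw [helig] at he
          simp only [Bool.and_eq_true, Bool.not_eq_true'] at he
          refine hP ⟨by simpa using he.1, ?_⟩
          rw [← hc1]
          exact h5.2
        cases hel : elig n with
        | false => simp [hP]
        | true =>
          have hnav : n ∉ av1 := fun hav => this ⟨hel, hav⟩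
          simp [hnav, hP]
    rw [aPass2_eq bet1 CM _ hCMnodup, hA1, hP2, hc1, hfilter_eq]
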